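-- pv_equiv track=rewrite | github.com/nikunjpanchal22/code_clone_classification | python_t1_t2_full/Gpt_false_pair_2687.py | get_most_ooo_words_type_4
-- ===== SOURCE A (Python) =====
-- def get_most_ooo_words_type_4( phrases ):
-- 	highest_o_occurrences = -1
-- 	most_ooo_words = []
--
-- 	for phrase in phrases:
-- 		words = phrase.split()
--
-- 		for word in words:
-- 			number_of_o = word.count('o')
--
-- 			if number_of_o > highest_o_occurrences:
-- 				highest_o_occurrences = number_of_o
-- 				most_ooo_words = [word]
--
-- 			elif number_of_o == highest_o_occurrences:
-- 				most_ooo_words.append(word)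
--
-- 	return most_ooo_words
-- ===== SOURCE B (Python) =====
-- def get_most_ooo_words_type_4(phrases):
--     words = [w for phrase in phrases for w in phrase.split()]
--     if not words:
--         return []
--     m = max(w.count('o') for w in words)
--     return [w for w in words if w.count('o') == m]
-- ===== Notes on version B (the rewrite author's own statement) =====
-- stated objective: simpler
-- what changed: Replaces the single running-max pass with nested loops and reset/append state by a flatten-then-global-max-then-filter two-pass structure.
import Mathlib
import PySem

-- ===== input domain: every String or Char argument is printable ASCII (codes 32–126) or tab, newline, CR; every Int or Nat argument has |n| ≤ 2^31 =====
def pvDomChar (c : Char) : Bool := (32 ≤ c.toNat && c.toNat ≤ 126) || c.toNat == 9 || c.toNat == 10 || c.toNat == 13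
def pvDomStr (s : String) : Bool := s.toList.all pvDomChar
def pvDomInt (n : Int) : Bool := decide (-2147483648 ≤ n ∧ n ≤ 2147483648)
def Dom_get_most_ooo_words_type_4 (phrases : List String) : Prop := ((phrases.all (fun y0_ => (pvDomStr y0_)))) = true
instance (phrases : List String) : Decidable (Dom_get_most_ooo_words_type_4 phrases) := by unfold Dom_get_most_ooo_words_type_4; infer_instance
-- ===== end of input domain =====

-- B replaces A's running-max pass with reset/append state by a simpler flatten, global max, then filter structure.


-- ===== PORT A =====
-- literal port: running max (starting at -1) with reset-to-[word] / append state, nested loops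
def get_most_ooo_words_type_4 (phrases : List String) : List String :=
  (phrases.foldl (fun st phrase =>
    (PySem.Str.split₀ phrase).foldl (fun st word =>
      let number_of_o : Int := (PySem.Str.count word "o" : Int)
      if number_of_o > st.1 then (number_of_o, [word])
      else if number_of_o == st.1 then (st.1, st.2 ++ [word])
      else st) st) ((-1 : Int), ([] : List String))).2

-- ===== PORT B =====
-- flatten all words, take the global max o-count, filter in order
def get_most_ooo_words_type_4_alt (phrases : List String) : List String :=
  let words := phrases.flatMap (fun phrase => PySem.Str.split₀ phrase)
  if words.isEmpty then []
  else
    let m := (PySem.List.max? (words.map (fun w => PySem.Str.count w "o")) (fun x => x)).getD 0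
    words.filter (fun w => PySem.Str.count w "o" == m)

-- ===== PRECONDITION & SPEC =====
def Spec_get_most_ooo_words_type_4 (phrases : List String) (out : List String) : Prop := out = get_most_ooo_words_type_4_alt phrases
instance (phrases : List String) (out : List String) : Decidable (Spec_get_most_ooo_words_type_4 phrases out) := by unfold Spec_get_most_ooo_words_type_4; infer_instance

-- ===== CLAIM (what is proved, stated in full; the proofs are below) =====
def Claim_equal_get_most_ooo_words_type_4 : Prop := ∀ (phrases : List String), Dom_get_most_ooo_words_type_4 phrases → Spec_get_most_ooo_words_type_4 phrases (get_most_ooo_words_type_4 phrases)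

-- ===== LEMMAS AND PROOFS =====

def cntO (w : String) : Int := (PySem.Str.count w "o" : Int)

def stepA (st : Int × List String) (word : String) : Int × List String :=
  if cntO word > st.1 then (cntO word, [word])
  else if cntO word == st.1 then (st.1, st.2 ++ [word])
  else st

def runMax (ws : List String) (h : Int) : Int := ws.foldl (fun a w => max a (cntO w)) h

lemma runMax_cons (w : String) (t : List String) (h : Int) :
    runMax (w :: t) h = runMax t (max h (cntO w)) := rfl

lemma le_runMax (ws : List String) (h : Int) : h ≤ runMax ws h := by
  induction ws generalizing h with
  | nil => simp [runMax]
  | cons w t ih => exact le_trans (le_max_left _ _) (ih (max h (cntO w)))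

lemma cntO_nonneg (w : String) : 0 ≤ cntO w := by simp [cntO]

lemma loop_eq (ws : List String) (h : Int) (res : List String) :
    ws.foldl stepA (h, res) =
    (runMax ws h,
     if runMax ws h > h
     then ws.filter (fun w => cntO w == runMax ws h)
     else res ++ ws.filter (fun w => cntO w == h)) := by
  induction ws generalizing h res with
  | nil => simp [runMax]
  | cons w t ih =>
    rw [List.foldl_cons, runMax_cons, List.filter_cons, List.filter_cons]
    by_cases h1 : cntO w > h
    · have hm : max h (cntO w) = cntO w := by omega
      rw [hm]
      have hstep : stepA (h, res) w = (cntO w, [w]) := by simp [stepA, h1]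
      rw [hstep, ih]
      have hgt : runMax t (cntO w) > h := lt_of_lt_of_le h1 (le_runMax t (cntO w))
      rw [if_pos hgt]
      by_cases h2 : runMax t (cntO w) > cntO w
      · rw [if_pos h2]
        have hne : (cntO w == runMax t (cntO w)) = false := by
          simp only [beq_eq_false_iff_ne, ne_eq]; omega
        rw [hne]; simp
      · rw [if_neg h2]
        have he : runMax t (cntO w) = cntO w := le_antisymm (by omega) (le_runMax t (cntO w))
        have heq : (cntO w == runMax t (cntO w)) = true := by simp [he]
        rw [heq]; simp [he]
    · have hm : max h (cntO w) = h := by omega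
      rw [hm]
      by_cases h2 : cntO w == h
      · have hstep : stepA (h, res) w = (h, res ++ [w]) := by simp [stepA, h1, h2]
        rw [hstep, ih]
        have hwh : cntO w = h := by simpa using h2
        by_cases h3 : runMax t h > h
        · rw [if_pos h3, if_pos h3]
          have hne : (cntO w == runMax t h) = false := by
            simp only [beq_eq_false_iff_ne, ne_eq]; omega
          rw [hne]; simp
        · rw [if_neg h3, if_neg h3, h2]
          simp
      · have hstep : stepA (h, res) w = (h, res) := by simp [stepA, h1, h2]
        rw [hstep, ih]
        have hwh : cntO w < h := by
          have : cntO w ≠ h := by simpa using h2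
          omega
        by_cases h3 : runMax t h > h
        · rw [if_pos h3, if_pos h3]
          have hne : (cntO w == runMax t h) = false := by
            simp only [beq_eq_false_iff_ne, ne_eq]; omega
          rw [hne]; simp
        · rw [if_neg h3, if_neg h3]
          have hne : (cntO w == h) = false := by
            simp only [beq_eq_false_iff_ne, ne_eq]; omega
          rw [hne]; simp

-- A's nested loops equal one fold over the flattened word list
lemma nested_eq_flat (phrases : List String) (st : Int × List String) :
    phrases.foldl (fun st phrase => (PySem.Str.split₀ phrase).foldl stepA st) st =
    (phrases.flatMap (fun phrase => PySem.Str.split₀ phrase)).foldl stepA st := by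
  induction phrases generalizing st with
  | nil => rfl
  | cons p t ih => simp [List.foldl_append, ih]

lemma natFold_cast (l : List String) (a : Nat) :
    ((List.foldl max a (l.map (fun w => PySem.Str.count w "o")) : Nat) : Int)
      = List.foldl (fun x w => max x (cntO w)) ((a : Nat) : Int) l := by
  induction l generalizing a with
  | nil => rfl
  | cons w t ih =>
    rw [List.map_cons, List.foldl_cons, List.foldl_cons, ih]
    congr 1
    simp [cntO, Nat.cast_max]

theorem main_equiv : ∀ (phrases : List String),
    get_most_ooo_words_type_4 phrases = get_most_ooo_words_type_4_alt phrases := by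
  intro phrases
  unfold get_most_ooo_words_type_4 get_most_ooo_words_type_4_alt
  have hA : (fun (st : Int × List String) (word : String) =>
      let number_of_o : Int := (PySem.Str.count word "o" : Int)
      if number_of_o > st.1 then (number_of_o, [word])
      else if number_of_o == st.1 then (st.1, st.2 ++ [word])
      else st) = stepA := by
    funext st word; simp [stepA, cntO]
  simp only [hA]
  rw [nested_eq_flat]
  cases hws : phrases.flatMap (fun phrase => PySem.Str.split₀ phrase) with
  | nil => simp
  | cons w t =>
    rw [show ((w :: t : List String).foldl stepA ((-1 : Int), ([] : List String))) =
        _ from loop_eq (w :: t) (-1) []]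
    have hF : runMax (w :: t) (-1) > -1 := by
      have h0 : (0 : Int) ≤ cntO w := cntO_nonneg w
      have h1 : max (-1 : Int) (cntO w) ≤ runMax (w :: t) (-1) := by
        rw [runMax_cons]; exact le_runMax t _
      omega
    rw [if_pos hF]
    have hmax : PySem.List.max? (PySem.Str.count w "o" :: t.map (fun w => PySem.Str.count w "o")) (fun x => x)
        = some (List.foldl max (PySem.Str.count w "o") (t.map (fun w => PySem.Str.count w "o"))) := by
      simpa using PySem.List.max?_id_cons (PySem.Str.count w "o") (t.map (fun w => PySem.Str.count w "o"))
    simp only [List.map_cons]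
    rw [hmax]
    have hcast : ((List.foldl max (PySem.Str.count w "o") (t.map (fun w => PySem.Str.count w "o")) : Nat) : Int)
        = runMax (w :: t) (-1) := by
      rw [natFold_cast]
      rw [runMax_cons]
      have : max (-1 : Int) (cntO w) = cntO w := by
        have := cntO_nonneg w; omega
      rw [this]
      rfl
    simp only [List.isEmpty_cons, Bool.false_eq_true, if_false, Option.getD_some]
    apply List.filter_congr
    intro x _
    have : (cntO x == runMax (w :: t) (-1)) =
        (cntO x == ((List.foldl max (PySem.Str.count w "o") (t.map (fun w => PySem.Str.count w "o")) : Nat) : Int)) := by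
      rw [hcast]
    rw [this]
    simp [cntO]

-- ===== VERDICT (by name: the statement is the Claim_ definition above) =====
theorem get_most_ooo_words_type_4_spec : Claim_equal_get_most_ooo_words_type_4 := by
  intro phrases _
  unfold Spec_get_most_ooo_words_type_4
  exact main_equiv phrases
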